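-- pv_equiv track=rewrite | github.com/jinxulin/inverse-reinforcement-learning | util/functions.py | init_state_list
-- ===== SOURCE A (Python) =====
-- def init_state_list(max_value_list):
--     state_list = list()
--     for i in range(max_value_list[0]):
--         for j in range(max_value_list[1]):
--             for k in range(max_value_list[2]):
--                 for l in range(max_value_list[3]):
--                     for n in range(max_value_list[4]):
--                         state_list.append(state_to_index([i, j, k, l, n]))
--     return state_list
--
-- def state_to_index(s):
--     idx = s[0]*10000 + s[1]*1000 + s[2]*100 + s[3]*10 + s[4]
--     return idx
-- ===== SOURCE B (Python) =====
-- def init_state_list(max_value_list):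
--     coefs = [10000, 1000, 100, 10, 1]
--     result = [0]
--     for dim in range(5):
--         if not result:
--             return result
--         result = [r + v * coefs[dim] for r in result for v in range(max_value_list[dim])]
--     return result
-- ===== Notes on version B (the rewrite author's own statement) =====
-- stated objective: simpler
-- what changed: Replaces the five hand-written nested loops plus the state_to_index encoder by a single dimension loop that grows the result by Cartesian expansion (result = [r + v*coef for r in result for v in range(max)]), returning early once the result is empty.
import Mathlib
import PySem

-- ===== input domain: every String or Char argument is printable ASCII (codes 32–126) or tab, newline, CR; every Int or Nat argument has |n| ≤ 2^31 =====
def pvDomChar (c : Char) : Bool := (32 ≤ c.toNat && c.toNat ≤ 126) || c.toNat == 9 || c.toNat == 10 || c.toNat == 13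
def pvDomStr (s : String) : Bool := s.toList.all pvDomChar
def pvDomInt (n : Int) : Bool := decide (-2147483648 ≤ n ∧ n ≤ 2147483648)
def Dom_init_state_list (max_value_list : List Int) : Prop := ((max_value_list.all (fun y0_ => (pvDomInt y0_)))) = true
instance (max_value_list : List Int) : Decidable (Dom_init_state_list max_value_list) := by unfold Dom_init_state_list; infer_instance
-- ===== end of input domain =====

-- B replaces the five nested loops + encoder by one dimension loop of Cartesian expansion (objective: simpler).

-- ===== PORT A =====
-- s[p] is ported with pyGetD; A only ever calls state_to_index with a 5-element list, where this is exact.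
def state_to_index (s : List Int) : Int :=
  PySem.List.pyGetD s 0 0 * 10000 + PySem.List.pyGetD s 1 0 * 1000 +
  PySem.List.pyGetD s 2 0 * 100 + PySem.List.pyGetD s 3 0 * 10 + PySem.List.pyGetD s 4 0

-- max_value_list[p] ported with pyGetD; Pre_ below admits exactly the inputs where Python never raises IndexError.
def init_state_list (max_value_list : List Int) : List Int :=
  (PySem.List.pyRange 0 (PySem.List.pyGetD max_value_list 0 0) 1).foldl (fun acc i =>
    (PySem.List.pyRange 0 (PySem.List.pyGetD max_value_list 1 0) 1).foldl (fun acc j =>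
      (PySem.List.pyRange 0 (PySem.List.pyGetD max_value_list 2 0) 1).foldl (fun acc k =>
        (PySem.List.pyRange 0 (PySem.List.pyGetD max_value_list 3 0) 1).foldl (fun acc l =>
          (PySem.List.pyRange 0 (PySem.List.pyGetD max_value_list 4 0) 1).foldl (fun acc n =>
            acc ++ [state_to_index [i, j, k, l, n]]) acc) acc) acc) acc) []

-- ===== PORT B =====
def pvCoefs : List Int := [10000, 1000, 100, 10, 1]

-- the 'for dim in range(5)' loop of Source B, with its early 'return result' on an empty result
def pvExpand (max_value_list : List Int) (dims : List Int) (result : List Int) : List Int :=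
  match dims with
  | [] => result
  | dim :: rest =>
    if result = [] then result
    else pvExpand max_value_list rest (result.flatMap (fun r =>
      (PySem.List.pyRange 0 (PySem.List.pyGetD max_value_list dim 0) 1).map (fun v =>
        r + v * PySem.List.pyGetD pvCoefs dim 0)))

def init_state_list_alt (max_value_list : List Int) : List Int :=
  pvExpand max_value_list (PySem.List.pyRange 0 5 1) [0]

-- ===== PRECONDITION & SPEC =====
-- Pre_ admits exactly the inputs on which Python A returns: either all five indices 0..4 exist,
-- or some in-range element is ≤ 0, which empties a range before any out-of-range index is read
-- (otherwise A — and B alike — raises IndexError).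
def Pre_init_state_list (max_value_list : List Int) : Prop :=
  5 ≤ max_value_list.length ∨ ∃ x ∈ max_value_list, x ≤ 0
instance (max_value_list : List Int) : Decidable (Pre_init_state_list max_value_list) := by
  unfold Pre_init_state_list; infer_instance
def pvWitness_init_state_list : List Int := [2, 3, 1, 1, 2]

def Spec_init_state_list (max_value_list : List Int) (out : List Int) : Prop := out = init_state_list_alt max_value_list
instance (max_value_list : List Int) (out : List Int) : Decidable (Spec_init_state_list max_value_list out) := by unfold Spec_init_state_list; infer_instance

-- ===== CLAIM (what is proved, stated in full; the proofs are below) =====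
def Claim_equal_init_state_list : Prop := ∀ (max_value_list : List Int), Dom_init_state_list max_value_list → Pre_init_state_list max_value_list → Spec_init_state_list max_value_list (init_state_list max_value_list)

-- ===== LEMMAS AND PROOFS =====

-- the pure value of B's expansion from a single seed r over the remaining dims
def pvN (m : List Int) (dims : List Int) (r : Int) : List Int :=
  match dims with
  | [] => [r]
  | d :: rest =>
    (PySem.List.pyRange 0 (PySem.List.pyGetD m d 0) 1).flatMap (fun v =>
      pvN m rest (r + v * PySem.List.pyGetD pvCoefs d 0))

theorem pvExpand_eq_flatMap (m : List Int) (dims : List Int) :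
    ∀ res : List Int, pvExpand m dims res = res.flatMap (pvN m dims) := by
  induction dims with
  | nil => intro res; simp [pvExpand, pvN]
  | cons d rest ih =>
    intro res
    by_cases h : res = []
    · subst h; simp [pvExpand]
    · simp only [pvExpand, if_neg h, ih, List.flatMap_assoc, List.flatMap_map]
      rfl

-- ===== VERDICT (by name: the statement is the Claim_ definition above) =====
theorem init_state_list_spec : Claim_equal_init_state_list := by
  intro m _ _
  unfold Spec_init_state_list init_state_list_alt
  rw [show PySem.List.pyRange 0 5 1 = [0, 1, 2, 3, 4] from rfl, pvExpand_eq_flatMap]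
  simp only [init_state_list, state_to_index, pvN, pvCoefs,
    PySem.List.foldl_append_singleton_eq_map, PySem.List.foldl_append_eq_flatMap,
    List.nil_append, List.flatMap_cons, List.flatMap_nil, List.append_nil,
    PySem.List.pyGetD, PySem.List.pyGet?, PySem.List.pyIdx?]
  simp only [show (2:Int).toNat = 2 from rfl, show (3:Int).toNat = 3 from rfl,
    show (4:Int).toNat = 4 from rfl, List.map_eq_flatMap]
  norm_num
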